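-- pv_equiv track=rewrite | github.com/johncoleman83/advent-of-code | 2016/python/src/day6.py | find_repititions
-- ===== SOURCE A (Python) =====
-- def sort_by_frequencies(alphas):
--     """
--     sorts string by frequencies
--     """
--     items = []
--     temp = [alphas[0]]
--     for x in range(1, len(alphas)):
--         if alphas[x] == alphas[x - 1]:
--             temp.append(alphas[x])
--         else:
--             items.append(''.join(temp))
--             temp = [alphas[x]]
--     items.append(''.join(temp))
--     newa = ''.join([k[0] for k in sorted(items, key=lambda x: -len(x))])
--     return newa
--
-- def find_repititions(dayinput):
--     """
--     first half solver:
--     get message from repititions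
--     """
--     lines = dayinput.split('\n')
--     rotated = []
--     rotated[:] = zip(*lines[::-1])
--     rotated = [''.join(sorted(list(x))) for x in rotated]
--     message = []
--     message2 = []
--     for line in rotated:
--         newalpha = sort_by_frequencies(line)
--         message.append(newalpha[0])
--         message2.append(newalpha[-1])
--     return "1: {} -- 2: {}".format(''.join(message), ''.join(message2))
-- ===== SOURCE B (Python) =====
-- def find_repititions(dayinput):
--     """
--     first half solver:
--     get message from repititions
--     """
--     lines = dayinput.split('\n')
--     message = []
--     message2 = []
--     for col in zip(*lines):
--         chars = set(col)
--         message.append(min(chars, key=lambda c: (-col.count(c), c)))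
--         message2.append(max(chars, key=lambda c: (-col.count(c), c)))
--     return "1: {} -- 2: {}".format(''.join(message), ''.join(message2))
-- ===== Notes on version B (the rewrite author's own statement) =====
-- stated objective: simpler
-- what changed: Instead of sorting each column, run-length grouping it, and stable-sorting the runs by length, B selects the two extreme characters directly with min/max over the column's distinct characters keyed by (-count, char).
import Mathlib
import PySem

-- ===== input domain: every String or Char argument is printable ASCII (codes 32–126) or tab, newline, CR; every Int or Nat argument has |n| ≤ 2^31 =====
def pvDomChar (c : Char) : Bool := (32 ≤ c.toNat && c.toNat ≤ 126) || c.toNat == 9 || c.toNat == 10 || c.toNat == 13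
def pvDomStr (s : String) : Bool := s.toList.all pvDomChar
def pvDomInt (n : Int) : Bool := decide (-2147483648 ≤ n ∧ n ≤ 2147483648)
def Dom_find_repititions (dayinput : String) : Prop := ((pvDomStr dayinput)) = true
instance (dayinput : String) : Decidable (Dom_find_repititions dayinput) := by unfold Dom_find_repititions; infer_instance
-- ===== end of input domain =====

-- B selects each column's extreme characters directly with min/max keyed by (-count, char)
-- instead of A's sort + run-length grouping + stable sort of the runs by length (objective: simpler).

-- ===== PORT A =====
-- helper shared by both ports: Python's zip(*rows) — columns up to the shortest row,
-- ported by hand (exact: zip truncates to the shortest iterable and yields nothing for no rows).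
def pvZipStar (rows : List (List Char)) : List (List Char) :=
  match rows with
  | [] => []
  | r :: rs =>
    let n := rs.foldl (fun m l => min m l.length) r.length
    (List.range n).map (fun i => (r :: rs).map (fun row => row.getD i ' '))

-- the body of A's 'for x in range(1, len(alphas))' loop; alphas[x] / alphas[x-1] are ported with
-- PySem.List.pyGetD (exact: the loop only reads in-range indices).
def pvGroupStep (alphas : List Char) (st : List (List Char) × List Char) (x : Int) :
    List (List Char) × List Char :=
  if PySem.List.pyGetD alphas x ' ' = PySem.List.pyGetD alphas (x - 1) ' ' then
    (st.1, st.2 ++ [PySem.List.pyGetD alphas x ' '])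
  else
    (st.1 ++ [st.2], [PySem.List.pyGetD alphas x ' '])

-- sort_by_frequencies; alphas[0] and k[0] are ported with headD (exact: A only reaches them on
-- nonempty strings / groups, which is all its caller produces).
def pvSortByFrequencies (alphas : List Char) : List Char :=
  let st := (PySem.List.pyRange 1 (PySem.List.len alphas)).foldl
    (pvGroupStep alphas) ([], [alphas.headD ' '])
  let items := st.1 ++ [st.2]
  (PySem.List.sorted items (fun k => -(k.length : Int))).map (fun k => k.headD ' ')

def find_repititions (dayinput : String) : String :=
  let lines := PySem.Chars.splitOn dayinput.toList ['\n']
  let rotated := pvZipStar lines.reverse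
  let rotated2 := rotated.map (fun x => PySem.List.sorted x (fun c => c))
  let st := rotated2.foldl
    (fun (st : List Char × List Char) line =>
      let newalpha := pvSortByFrequencies line
      (st.1 ++ [newalpha.headD ' '], st.2 ++ [newalpha.getLastD ' ']))
    ([], [])
  String.ofList ("1: ".toList ++ st.1 ++ " -- 2: ".toList ++ st.2)

-- ===== PORT B =====
-- min(chars, key=...) / max(chars, key=...) over set(col) with the tuple key (-col.count(c), c);
-- the key's second component is the element itself, so it is injective and the set's iteration
-- order cannot matter. The .getD ' ' default is never reached (columns are nonempty).
def find_repititions_alt (dayinput : String) : String :=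
  let lines := PySem.Chars.splitOn dayinput.toList ['\n']
  let st := (pvZipStar lines).foldl
    (fun (st : List Char × List Char) col =>
      let chars : PySem.Set Char := PySem.Set.ofList col
      let most := (PySem.List.min2? chars (fun c => -(col.count c : Int)) (fun c => c)).getD ' '
      let least := (PySem.List.max2? chars (fun c => -(col.count c : Int)) (fun c => c)).getD ' '
      (st.1 ++ [most], st.2 ++ [least]))
    ([], [])
  String.ofList ("1: ".toList ++ st.1 ++ " -- 2: ".toList ++ st.2)

-- ===== PRECONDITION & SPEC =====
def Spec_find_repititions (dayinput : String) (out : String) : Prop := out = find_repititions_alt dayinput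
instance (dayinput : String) (out : String) : Decidable (Spec_find_repititions dayinput out) := by unfold Spec_find_repititions; infer_instance

-- ===== CLAIM (what is proved, stated in full; the proofs are below) =====
def Claim_equal_find_repititions : Prop := ∀ (dayinput : String), Dom_find_repititions dayinput → Spec_find_repititions dayinput (find_repititions dayinput)

-- ===== LEMMAS AND PROOFS =====

-- clean structural form of A's grouping loop: current previous char p, current run temp
def pvRuns (p : Char) (temp : List Char) : List Char → List (List Char)
  | [] => [temp]
  | c :: t => if c = p then pvRuns c (temp ++ [c]) t else temp :: pvRuns c [c] t

-- LAST maximal element by key (what the getLast of a stable ascending sort is)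
def pvLastMax? {α : Type} (xs : List α) (key : α → Int) : Option α :=
  xs.foldl (fun acc x => match acc with
    | none => some x
    | some m => if key x < key m then some m else some x) none

-- the unique character a column's most-frequent selection must return
def pvIsMost (col : List Char) (m : Char) : Prop :=
  m ∈ col ∧ ∀ y ∈ col, y ≠ m → (col.count y < col.count m ∨ (col.count y = col.count m ∧ m < y))

def pvIsLeast (col : List Char) (m : Char) : Prop :=
  m ∈ col ∧ ∀ y ∈ col, y ≠ m → (col.count m < col.count y ∨ (col.count m = col.count y ∧ y < m))

lemma pvIsMost_unique {col : List Char} {m m' : Char} (h : pvIsMost col m) (h' : pvIsMost col m') :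
    m = m' := by
  by_contra hne
  rcases h.2 m' h'.1 (fun e => hne e.symm) with h1 | ⟨h1, h2⟩ <;>
    rcases h'.2 m h.1 hne with g1 | ⟨g1, g2⟩ <;> first | omega | exact absurd (h2.trans g2) (lt_irrefl m)

lemma pvIsLeast_unique {col : List Char} {m m' : Char} (h : pvIsLeast col m) (h' : pvIsLeast col m') :
    m = m' := by
  by_contra hne
  rcases h.2 m' h'.1 (fun e => hne e.symm) with h1 | ⟨h1, h2⟩ <;>
    rcases h'.2 m h.1 hne with g1 | ⟨g1, g2⟩ <;> first | omega | exact absurd (h2.trans g2) (lt_irrefl m')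

-- === A's loop equals pvRuns ===
lemma pvLoop_eq (alphas : List Char) :
    ∀ (fuel j : Nat), alphas.length - (j + 1) = fuel → j < alphas.length →
    ∀ (acc : List (List Char)) (temp : List Char),
    (let st := (PySem.List.pyRange ((j : Int) + 1) (PySem.List.len alphas)).foldl
        (pvGroupStep alphas) (acc, temp)
     st.1 ++ [st.2]) = acc ++ pvRuns (alphas[j]!) temp (alphas.drop (j + 1)) := by
  intro fuel
  induction fuel with
  | zero =>
    intro j hfj hj acc temp
    have hge : alphas.length ≤ j + 1 := by omega
    have h1 : PySem.List.pyRange ((j : Int) + 1) (PySem.List.len alphas) = [] := by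
      have : PySem.List.len alphas ≤ (j : Int) + 1 := by
        simp only [PySem.List.len]; omega
      simp [PySem.List.pyRange]
      omega
    have h2 : alphas.drop (j + 1) = [] := List.drop_eq_nil_of_le hge
    rw [h1, h2]
    simp [pvRuns]
  | succ n ih =>
    intro j hfj hj acc temp
    have hlt : j + 1 < alphas.length := by omega
    have hcast : ((j : Int) + 1) < PySem.List.len alphas := by
      simp only [PySem.List.len]; omega
    rw [PySem.List.pyRange_one_cons hcast, List.foldl_cons]
    have hx : PySem.List.pyGetD alphas ((j : Int) + 1) ' ' = alphas[j + 1] := by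
      have e : ((j : Int) + 1) = ((j + 1 : Nat) : Int) := by push_cast; ring
      rw [e, PySem.List.pyGetD_natCast]
      exact List.getD_eq_getElem alphas ' ' hlt
    have hx1 : PySem.List.pyGetD alphas ((j : Int) + 1 - 1) ' ' = alphas[j] := by
      have e : ((j : Int) + 1 - 1) = ((j : Nat) : Int) := by push_cast; ring
      rw [e, PySem.List.pyGetD_natCast]
      exact List.getD_eq_getElem alphas ' ' hj
    have hdrop : alphas.drop (j + 1) = alphas[j + 1] :: alphas.drop (j + 2) :=
      (List.getElem_cons_drop hlt).symm
    have hgj : alphas[j]! = alphas[j] := getElem!_pos alphas j hj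
    have hgj1 : alphas[j + 1]! = alphas[j + 1] := getElem!_pos alphas (j + 1) hlt
    have hstep : pvGroupStep alphas (acc, temp) ((j : Int) + 1) =
        if alphas[j + 1] = alphas[j] then (acc, temp ++ [alphas[j + 1]])
        else (acc ++ [temp], [alphas[j + 1]]) := by
      simp only [pvGroupStep, hx, hx1]
    rw [hstep]
    by_cases heq : alphas[j + 1] = alphas[j]
    · rw [if_pos heq]
      have hrec := ih (j + 1) (by omega) hlt acc (temp ++ [alphas[j + 1]])
      have e2 : (((j + 1 : Nat) : Int) + 1) = ((j : Int) + 1 + 1) := by push_cast; ring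
      rw [e2] at hrec
      simp only at hrec ⊢
      rw [hrec, hdrop]
      simp [pvRuns, hgj, hgj1, heq]
    · rw [if_neg heq]
      have hrec := ih (j + 1) (by omega) hlt (acc ++ [temp]) [alphas[j + 1]]
      have e2 : (((j + 1 : Nat) : Int) + 1) = ((j : Int) + 1 + 1) := by push_cast; ring
      rw [e2] at hrec
      simp only at hrec ⊢
      rw [hrec, hdrop]
      simp [pvRuns, hgj, hgj1, heq]

lemma pvSbf_eq (a : Char) (t : List Char) :
    pvSortByFrequencies (a :: t) =
      (PySem.List.sorted (pvRuns a [a] t) (fun k => -(k.length : Int))).map (fun k => k.headD ' ') := by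
  have h := pvLoop_eq (a :: t) ((a :: t).length - 1) 0 (by simp) (by simp) [] [a]
  simp only [List.getElem!_eq_getElem?_getD, List.getElem?_cons_zero, Option.getD_some,
    List.drop_one, List.tail_cons] at h
  norm_num at h
  unfold pvSortByFrequencies
  simp only [List.headD_cons, PySem.List.len, List.length_cons]
  push_cast
  rw [h]

-- === structure of pvRuns on a sorted list ===
lemma pvRuns_spec :
    ∀ (rest : List Char) (p : Char) (k : Nat), 1 ≤ k →
    (p :: rest).Pairwise (· ≤ ·) →
    (∀ g ∈ pvRuns p (List.replicate k p) rest, ∃ c n, 1 ≤ n ∧ g = List.replicate n c ∧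
        n = (List.replicate k p ++ rest).count c ∧ c ∈ List.replicate k p ++ rest) ∧
    (∀ c ∈ List.replicate k p ++ rest,
        List.replicate ((List.replicate k p ++ rest).count c) c ∈ pvRuns p (List.replicate k p) rest) ∧
    ((pvRuns p (List.replicate k p) rest).map (fun g => g.headD ' ')).Pairwise (· < ·) ∧
    ((pvRuns p (List.replicate k p) rest).map (fun g => g.headD ' ')).head? = some p := by
  intro rest
  induction rest with
  | nil =>
    intro p k hk _
    obtain ⟨k', rfl⟩ : ∃ k', k = k' + 1 := ⟨k - 1, by omega⟩
    refine ⟨?_, ?_, by simp [pvRuns], by simp [pvRuns, List.replicate_succ]⟩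
    · intro g hg
      simp only [pvRuns, List.mem_singleton] at hg
      subst hg
      exact ⟨p, k' + 1, by omega, rfl, by simp [List.count_replicate], by simp [List.replicate_succ]⟩
    · intro c hc
      simp only [List.append_nil] at hc ⊢
      have hcp : c = p := List.eq_of_mem_replicate hc
      subst hcp
      simp [pvRuns, List.count_replicate]
  | cons c t ih =>
    intro p k hk hp
    by_cases hc : c = p
    · subst hc
      have e : List.replicate k c ++ [c] = List.replicate (k + 1) c := by
        rw [List.replicate_succ']
      have e2 : List.replicate k c ++ c :: t = List.replicate (k + 1) c ++ t := by
        rw [← List.singleton_append, ← List.append_assoc, e]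
      have hrw : pvRuns c (List.replicate k c) (c :: t) =
          pvRuns c (List.replicate (k + 1) c) t := by
        simp [pvRuns, e]
      have hmain := ih c (k + 1) (by omega) hp.of_cons
      rw [hrw, e2]
      exact hmain
    · have hpc : p < c :=
        lt_of_le_of_ne ((List.pairwise_cons.mp hp).1 c (by simp)) (fun e => hc e.symm)
      have hct : ∀ x ∈ t, c ≤ x := (List.pairwise_cons.mp hp.of_cons).1
      have hplt : ∀ x ∈ c :: t, p < x := by
        intro x hx
        rcases List.mem_cons.mp hx with rfl | hx
        · exact hpc
        · exact lt_of_lt_of_le hpc (hct x hx)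
      have hpnot : p ∉ c :: t := fun hmem => lt_irrefl p (hplt p hmem)
      obtain ⟨hsound, hcomp, hpair, hhead⟩ := ih c 1 (le_refl 1) hp.of_cons
      have hrw : pvRuns p (List.replicate k p) (c :: t) =
          List.replicate k p :: pvRuns c (List.replicate 1 c) t := by
        simp [pvRuns, hc]
      have hcount : ∀ d ∈ c :: t,
          (List.replicate k p ++ c :: t).count d = (List.replicate 1 c ++ t).count d := by
        intro d hd
        have hdp : d ≠ p := fun e => hpnot (e ▸ hd)
        simp [List.count_append, List.count_replicate, hdp, Ne.symm hdp]
      have hcountp : (List.replicate k p ++ c :: t).count p = k := by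
        have : (c :: t).count p = 0 := List.count_eq_zero.mpr hpnot
        simp [List.count_append, List.count_replicate, this]
      refine ⟨?_, ?_, ?_, ?_⟩
      · intro g hg
        rw [hrw] at hg
        rcases List.mem_cons.mp hg with rfl | hg
        · exact ⟨p, k, hk, rfl, by rw [hcountp], by
            obtain ⟨k', rfl⟩ : ∃ k', k = k' + 1 := ⟨k - 1, by omega⟩
            simp [List.replicate_succ]⟩
        · obtain ⟨d, n, hn, rfl, hcnt, hd⟩ := hsound g hg
          have hd' : d ∈ c :: t := by
            rcases List.mem_append.mp hd with hd | hd
            · simp at hd; simp [hd]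
            · simp [hd]
          exact ⟨d, n, hn, rfl, by rw [hcount d hd']; exact hcnt, by
            rcases List.mem_append.mp hd with hd | hd
            · simp at hd; simp [hd]
            · simp [hd]⟩
      · intro d hd
        rw [hrw]
        rcases List.mem_append.mp hd with hd | hd
        · have hdp : d = p := List.eq_of_mem_replicate hd
          subst hdp
          rw [hcountp]
          exact List.mem_cons_self ..
        · have := hcomp d (by
            rcases List.mem_cons.mp hd with rfl | hd'
            · simp
            · simp [hd'])
          rw [← hcount d hd] at this
          exact List.mem_cons_of_mem _ this
      · rw [hrw]
        simp only [List.map_cons]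
        refine List.pairwise_cons.mpr ⟨?_, hpair⟩
        intro h' hh'
        obtain ⟨g, hg, rfl⟩ := List.mem_map.mp hh'
        obtain ⟨d, n, hn, rfl, _, hd⟩ := hsound g hg
        have hdhead : (List.replicate n d).headD ' ' = d := by
          obtain ⟨n', rfl⟩ : ∃ n', n = n' + 1 := ⟨n - 1, by omega⟩
          simp [List.replicate_succ]
        rw [hdhead]
        have hrepl : (List.replicate k p).headD ' ' = p := by
          obtain ⟨k', rfl⟩ : ∃ k', k = k' + 1 := ⟨k - 1, by omega⟩
          simp [List.replicate_succ]
        rw [hrepl]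
        apply hplt
        rcases List.mem_append.mp hd with hd | hd
        · simp at hd; simp [hd]
        · simp [hd]
      · rw [hrw]
        simp only [List.map_cons, List.head?_cons]
        congr 1
        obtain ⟨k', rfl⟩ : ∃ k', k = k' + 1 := ⟨k - 1, by omega⟩
        simp [List.replicate_succ]

-- === head/getLast of a stable ascending sort ===
lemma pvGetLast?_cons_of_ne_nil {α : Type} (a : α) {l : List α} (h : l ≠ []) :
    (a :: l).getLast? = l.getLast? := by
  cases l with
  | nil => exact absurd rfl h
  | cons b t => exact List.getLast?_cons_cons ..

lemma pvInsertBy_ne_nil {α : Type} (before : α → α → Bool) (x : α) (l : List α) :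
    PySem.List.insertBy before x l ≠ [] := by
  cases l with
  | nil => simp [PySem.List.insertBy]
  | cons y t => simp only [PySem.List.insertBy]; split <;> simp

lemma pvHead?_insertBy {α : Type} (key : α → Int) (x : α) (l : List α) :
    (PySem.List.insertBy (fun a b => decide (key a < key b)) x l).head? =
      (match l.head? with
        | none => some x
        | some y => if key x < key y then some x else some y) := by
  cases l with
  | nil => rfl
  | cons y t => simp only [PySem.List.insertBy, List.head?_cons]; split <;> simp_all

lemma pvHead?_sorted {α : Type} (xs : List α) (key : α → Int) :
    (PySem.List.sorted xs key).head? = PySem.List.min? xs key := by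
  rw [PySem.List.sorted_eq_foldl_insertBy]
  show _ = List.foldl _ none xs
  have : (none : Option α) = ([] : List α).head? := rfl
  rw [this]
  generalize ([] : List α) = acc
  induction xs generalizing acc with
  | nil => rfl
  | cons x t ih =>
    simp only [List.foldl_cons]
    rw [ih, pvHead?_insertBy]
    rfl

lemma pvGetLast?_insertBy {α : Type} (key : α → Int) (x : α) (l : List α)
    (hl : l.Pairwise (fun a b => key a ≤ key b)) :
    (PySem.List.insertBy (fun a b => decide (key a < key b)) x l).getLast? =
      (match l.getLast? with
        | none => some x
        | some m => if key x < key m then some m else some x) := by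
  induction l with
  | nil => rfl
  | cons y t ih =>
    simp only [PySem.List.insertBy]
    rcases List.pairwise_cons.mp hl with ⟨hy, ht⟩
    split
    · -- key x < key y : x inserted in front
      rename_i hxy
      simp only [decide_eq_true_eq] at hxy
      have hkey : key x < key ((y :: t).getLast (by simp)) := by
        rcases List.mem_cons.mp (List.getLast_mem (l := y :: t) (by simp)) with h | h
        · rw [h]; exact hxy
        · exact lt_of_lt_of_le hxy (hy _ h)
      rw [List.getLast?_cons_cons, List.getLast?_eq_some_getLast (by simp)]
      simp [hkey]
    · -- x goes past y
      rename_i hxy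
      simp only [decide_eq_true_eq] at hxy
      push Not at hxy
      have hne := pvInsertBy_ne_nil (fun a b => decide (key a < key b)) x t
      rw [pvGetLast?_cons_of_ne_nil _ hne, ih ht]
      cases t with
      | nil => simp [not_lt.mpr hxy]
      | cons c t' => rw [List.getLast?_cons_cons]

lemma pvGetLast?_sorted {α : Type} (xs : List α) (key : α → Int) :
    (PySem.List.sorted xs key).getLast? = pvLastMax? xs key := by
  induction xs using List.reverseRecOn with
  | nil => rfl
  | append_singleton xs x ih =>
    have hsnoc : PySem.List.sorted (xs ++ [x]) key =
        PySem.List.insertBy (fun a b => decide (key a < key b)) x (PySem.List.sorted xs key) := by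
      rw [PySem.List.sorted_eq_foldl_insertBy, PySem.List.sorted_eq_foldl_insertBy,
        List.foldl_append, List.foldl_cons, List.foldl_nil]
    rw [hsnoc, pvGetLast?_insertBy _ _ _ (PySem.List.sorted_pairwise xs key), ih]
    simp only [pvLastMax?, List.foldl_append, List.foldl_cons, List.foldl_nil]

-- === first-min / last-max are the lexicographic extremes when the tie-break key is increasing ===
lemma pvMin?_lex {α : Type} (key : α → Int) (h2 : α → Char) :
    ∀ (xs : List α), (xs.Pairwise (fun a b => h2 a < h2 b)) → ∀ m, PySem.List.min? xs key = some m →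
      m ∈ xs ∧ ∀ g ∈ xs, g ≠ m → key m < key g ∨ (key m = key g ∧ h2 m < h2 g) := by
  intro xs
  induction xs using List.reverseRecOn with
  | nil => intro _ m hm; simp [PySem.List.min?] at hm
  | append_singleton xs x ih =>
    intro hp m hm
    have hpx : ∀ a ∈ xs, h2 a < h2 x := fun a ha =>
      (List.pairwise_append.mp hp).2.2 a ha x (by simp)
    have hpxs : xs.Pairwise (fun a b => h2 a < h2 b) := (List.pairwise_append.mp hp).1
    rw [PySem.List.min?, List.foldl_append] at hm
    cases hmin : PySem.List.min? xs key with
    | none =>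
      have hxs : xs = [] := (PySem.List.min?_eq_none_iff xs key).mp hmin
      rw [PySem.List.min?] at hmin
      rw [hmin] at hm
      simp at hm
      subst hm; subst hxs
      exact ⟨by simp, by intro g hg hne; simp at hg; exact absurd hg hne⟩
    | some m0 =>
      obtain ⟨hmem0, hlex0⟩ := ih hpxs m0 hmin
      rw [PySem.List.min?] at hmin
      rw [hmin] at hm
      simp only [List.foldl_cons, List.foldl_nil] at hm
      by_cases hx : key x < key m0
      · rw [if_pos hx] at hm
        injection hm with hm; subst hm
        refine ⟨by simp, ?_⟩
        intro g hg hne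
        rcases List.mem_append.mp hg with hg | hg
        · by_cases hgm : g = m0
          · subst hgm; exact Or.inl hx
          · rcases hlex0 g hg hgm with h | ⟨h, _⟩
            · exact Or.inl (lt_trans hx h)
            · exact Or.inl (lt_of_lt_of_le hx (le_of_eq h))
        · simp at hg; subst hg; exact absurd rfl hne
      · rw [if_neg hx] at hm
        injection hm with hm; subst hm
        refine ⟨List.mem_append_left _ hmem0, ?_⟩
        intro g hg hne
        rcases List.mem_append.mp hg with hg | hg
        · exact hlex0 g hg hne
        · simp at hg; subst hg
          rcases lt_or_eq_of_le (not_lt.mp hx) with h | h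
          · exact Or.inl h
          · exact Or.inr ⟨h, hpx _ hmem0⟩

lemma pvLastMax?_cons_isSome {α : Type} (key : α → Int) :
    ∀ (t : List α) (a : α), ∃ b, pvLastMax? (a :: t) key = some b := by
  intro t
  induction t with
  | nil => exact fun a => ⟨a, rfl⟩
  | cons x t ih =>
    intro a
    rw [pvLastMax?, List.foldl_cons, List.foldl_cons]
    dsimp only
    have hx := ih x
    have ha := ih a
    rw [pvLastMax?, List.foldl_cons] at hx ha
    dsimp only at hx ha
    split
    · exact ha
    · exact hx

lemma pvLastMax?_eq_none {α : Type} {xs : List α} {key : α → Int}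
    (h : pvLastMax? xs key = none) : xs = [] := by
  cases xs with
  | nil => rfl
  | cons a t =>
    obtain ⟨b, hb⟩ := pvLastMax?_cons_isSome key t a
    rw [hb] at h
    cases h

lemma pvLastMax?_lex {α : Type} (key : α → Int) (h2 : α → Char) :
    ∀ (xs : List α), (xs.Pairwise (fun a b => h2 a < h2 b)) → ∀ m, pvLastMax? xs key = some m →
      m ∈ xs ∧ ∀ g ∈ xs, g ≠ m → key g < key m ∨ (key g = key m ∧ h2 g < h2 m) := by
  intro xs
  induction xs using List.reverseRecOn with
  | nil => intro _ m hm; simp [pvLastMax?] at hm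
  | append_singleton xs x ih =>
    intro hp m hm
    have hpx : ∀ a ∈ xs, h2 a < h2 x := fun a ha =>
      (List.pairwise_append.mp hp).2.2 a ha x (by simp)
    have hpxs : xs.Pairwise (fun a b => h2 a < h2 b) := (List.pairwise_append.mp hp).1
    rw [pvLastMax?, List.foldl_append] at hm
    cases hmin : pvLastMax? xs key with
    | none =>
      have hxs : xs = [] := pvLastMax?_eq_none hmin
      rw [pvLastMax?] at hmin
      rw [hmin] at hm
      simp at hm
      subst hm; subst hxs
      exact ⟨by simp, by intro g hg hne; simp at hg; exact absurd hg hne⟩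
    | some m0 =>
      obtain ⟨hmem0, hlex0⟩ := ih hpxs m0 hmin
      rw [pvLastMax?] at hmin
      rw [hmin] at hm
      simp only [List.foldl_cons, List.foldl_nil] at hm
      by_cases hx : key x < key m0
      · rw [if_pos hx] at hm
        injection hm with hm; subst hm
        refine ⟨List.mem_append_left _ hmem0, ?_⟩
        intro g hg hne
        rcases List.mem_append.mp hg with hg | hg
        · exact hlex0 g hg hne
        · simp at hg; subst hg; exact Or.inl hx
      · rw [if_neg hx] at hm
        injection hm with hm; subst hm
        refine ⟨by simp, ?_⟩
        intro g hg hgne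
        rcases List.mem_append.mp hg with hg | hg
        · have hgle : key g ≤ key m0 := by
            by_cases hgm : g = m0
            · exact le_of_eq (by rw [hgm])
            · rcases hlex0 g hg hgm with h | ⟨h, _⟩
              · exact le_of_lt h
              · exact le_of_eq h
          rcases lt_or_eq_of_le (le_trans hgle (not_lt.mp hx)) with h | h
          · exact Or.inl h
          · exact Or.inr ⟨h, hpx _ hg⟩
        · simp at hg; subst hg; exact absurd rfl hgne

-- === B's min2?/max2? with the element itself as second key ===
lemma pvMin2?_cons_isSome (k1 : Char → Int) :
    ∀ (t : List Char) (a : Char), ∃ b, PySem.List.min2? (a :: t) k1 (fun c => c) = some b := by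
  intro t
  induction t with
  | nil => exact fun a => ⟨a, rfl⟩
  | cons x t ih =>
    intro a
    rw [PySem.List.min2?, List.foldl_cons, List.foldl_cons]
    dsimp only
    have hx := ih x
    have ha := ih a
    rw [PySem.List.min2?, List.foldl_cons] at hx ha
    dsimp only at hx ha
    split
    · exact hx
    · exact ha

lemma pvMin2?_eq_none {xs : List Char} {k1 : Char → Int}
    (h : PySem.List.min2? xs k1 (fun c => c) = none) : xs = [] := by
  cases xs with
  | nil => rfl
  | cons a t =>
    obtain ⟨b, hb⟩ := pvMin2?_cons_isSome k1 t a
    rw [hb] at h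
    cases h

lemma pvMax2?_cons_isSome (k1 : Char → Int) :
    ∀ (t : List Char) (a : Char), ∃ b, PySem.List.max2? (a :: t) k1 (fun c => c) = some b := by
  intro t
  induction t with
  | nil => exact fun a => ⟨a, rfl⟩
  | cons x t ih =>
    intro a
    rw [PySem.List.max2?, List.foldl_cons, List.foldl_cons]
    dsimp only
    have hx := ih x
    have ha := ih a
    rw [PySem.List.max2?, List.foldl_cons] at hx ha
    dsimp only at hx ha
    split
    · exact hx
    · exact ha

lemma pvMax2?_eq_none {xs : List Char} {k1 : Char → Int}
    (h : PySem.List.max2? xs k1 (fun c => c) = none) : xs = [] := by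
  cases xs with
  | nil => rfl
  | cons a t =>
    obtain ⟨b, hb⟩ := pvMax2?_cons_isSome k1 t a
    rw [hb] at h
    cases h

lemma pvMin2?_lex (k1 : Char → Int) :
    ∀ (xs : List Char) (m : Char), PySem.List.min2? xs k1 (fun c => c) = some m →
      m ∈ xs ∧ ∀ y ∈ xs, y ≠ m → k1 m < k1 y ∨ (k1 m = k1 y ∧ m < y) := by
  intro xs
  induction xs using List.reverseRecOn with
  | nil => intro m hm; simp [PySem.List.min2?] at hm
  | append_singleton xs x ih =>
    intro m hm
    rw [PySem.List.min2?, List.foldl_append] at hm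
    cases hmin : PySem.List.min2? xs k1 (fun c => c) with
    | none =>
      have hxs : xs = [] := pvMin2?_eq_none hmin
      rw [PySem.List.min2?] at hmin
      rw [hmin] at hm
      simp at hm
      subst hm; subst hxs
      exact ⟨by simp, by intro g hg hne; simp at hg; exact absurd hg hne⟩
    | some m0 =>
      obtain ⟨hmem0, hlex0⟩ := ih m0 hmin
      rw [PySem.List.min2?] at hmin
      rw [hmin] at hm
      simp only [List.foldl_cons, List.foldl_nil] at hm
      by_cases c1 : k1 x < k1 m0 <;> by_cases c2 : k1 m0 < k1 x <;> by_cases c3 : x < m0 <;>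
        simp only [c1, c2, c3, decide_true, decide_false, Bool.true_or, Bool.false_or,
          Bool.not_true, Bool.not_false, Bool.false_and, Bool.true_and, Bool.or_false,
          Bool.or_true, if_true, if_false, reduceIte] at hm <;>
        first
        | omega
        | (injection hm with hm; subst hm
           constructor
           · first | exact List.mem_append_left _ hmem0 | simp
           · intro g hg hne
             rcases List.mem_append.mp hg with hg | hg
             · by_cases hgm : g = m0
               · subst hgm
                 first
                 | exact Or.inl c1
                 | exact Or.inr ⟨le_antisymm (not_lt.mp c2) (not_lt.mp c1), c3⟩
                 | exact Or.inr ⟨le_antisymm (not_lt.mp c1) (not_lt.mp c2), c3⟩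
                 | exact Or.inr ⟨le_antisymm (not_lt.mp c2) (not_lt.mp c1), c3⟩
                 | exact absurd rfl hne
               · rcases hlex0 g hg hgm with h | ⟨h, h'⟩
                 · first
                   | exact Or.inl (lt_trans c1 h)
                   | exact Or.inl (lt_of_le_of_lt (le_of_eq (le_antisymm (not_lt.mp c2) (not_lt.mp c1))) h)
                   | exact Or.inl (lt_of_le_of_lt (le_of_eq (le_antisymm (not_lt.mp c1) (not_lt.mp c2))) h)
                   | exact Or.inl h
                 · first
                   | exact Or.inl (lt_of_lt_of_le c1 (le_of_eq h))
                   | exact Or.inl (lt_of_le_of_lt (le_of_eq h.symm) c1)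
                   | exact Or.inr ⟨(le_antisymm (not_lt.mp c2) (not_lt.mp c1)).trans h, lt_trans c3 h'⟩
                   | exact Or.inr ⟨(le_antisymm (not_lt.mp c1) (not_lt.mp c2)).trans h, lt_trans c3 h'⟩
                   | exact Or.inr ⟨h, h'⟩
             · simp at hg; subst hg
               first
               | exact Or.inl c1
               | exact Or.inr ⟨le_antisymm (not_lt.mp c2) (not_lt.mp c1), c3⟩
               | exact Or.inr ⟨le_antisymm (not_lt.mp c1) (not_lt.mp c2), c3⟩
               | exact Or.inl c2
               | exact Or.inr ⟨le_antisymm (not_lt.mp c1) (not_lt.mp c2),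
                   lt_of_le_of_ne (not_lt.mp c3) (fun e => hne e.symm)⟩
               | exact Or.inr ⟨le_antisymm (not_lt.mp c2) (not_lt.mp c1),
                   lt_of_le_of_ne (not_lt.mp c3) (fun e => hne e.symm)⟩
               | exact absurd rfl hne)

lemma pvMax2?_lex (k1 : Char → Int) :
    ∀ (xs : List Char) (m : Char), PySem.List.max2? xs k1 (fun c => c) = some m →
      m ∈ xs ∧ ∀ y ∈ xs, y ≠ m → k1 y < k1 m ∨ (k1 y = k1 m ∧ y < m) := by
  intro xs
  induction xs using List.reverseRecOn with
  | nil => intro m hm; simp [PySem.List.max2?] at hm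
  | append_singleton xs x ih =>
    intro m hm
    rw [PySem.List.max2?, List.foldl_append] at hm
    cases hmin : PySem.List.max2? xs k1 (fun c => c) with
    | none =>
      have hxs : xs = [] := pvMax2?_eq_none hmin
      rw [PySem.List.max2?] at hmin
      rw [hmin] at hm
      simp at hm
      subst hm; subst hxs
      exact ⟨by simp, by intro g hg hne; simp at hg; exact absurd hg hne⟩
    | some m0 =>
      obtain ⟨hmem0, hlex0⟩ := ih m0 hmin
      rw [PySem.List.max2?] at hmin
      rw [hmin] at hm
      simp only [List.foldl_cons, List.foldl_nil] at hm
      by_cases c1 : k1 m0 < k1 x <;> by_cases c2 : k1 x < k1 m0 <;> by_cases c3 : m0 < x <;>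
        simp only [c1, c2, c3, decide_true, decide_false, Bool.true_or, Bool.false_or,
          Bool.not_true, Bool.not_false, Bool.false_and, Bool.true_and, Bool.or_false,
          Bool.or_true, if_true, if_false, reduceIte] at hm <;>
        first
        | omega
        | (injection hm with hm; subst hm
           constructor
           · first | exact List.mem_append_left _ hmem0 | simp
           · intro g hg hne
             rcases List.mem_append.mp hg with hg | hg
             · by_cases hgm : g = m0
               · subst hgm
                 first
                 | exact Or.inl c1
                 | exact Or.inr ⟨le_antisymm (not_lt.mp c1) (not_lt.mp c2), c3⟩
                 | exact Or.inr ⟨le_antisymm (not_lt.mp c2) (not_lt.mp c1), c3⟩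
                 | exact absurd rfl hne
               · rcases hlex0 g hg hgm with h | ⟨h, h'⟩
                 · first
                   | exact Or.inl (lt_trans h c1)
                   | exact Or.inl (lt_of_lt_of_le h (le_of_eq (le_antisymm (not_lt.mp c1) (not_lt.mp c2))))
                   | exact Or.inl (lt_of_lt_of_le h (le_of_eq (le_antisymm (not_lt.mp c2) (not_lt.mp c1))))
                   | exact Or.inl h
                 · first
                   | exact Or.inl (lt_of_le_of_lt (le_of_eq h) c1)
                   | exact Or.inl (lt_of_lt_of_le c1 (le_of_eq h.symm))
                   | exact Or.inr ⟨h.trans (le_antisymm (not_lt.mp c1) (not_lt.mp c2)), lt_trans h' c3⟩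
                   | exact Or.inr ⟨h.trans (le_antisymm (not_lt.mp c2) (not_lt.mp c1)), lt_trans h' c3⟩
                   | exact Or.inr ⟨h, h'⟩
             · simp at hg; subst hg
               first
               | exact Or.inl c1
               | exact Or.inr ⟨le_antisymm (not_lt.mp c1) (not_lt.mp c2), c3⟩
               | exact Or.inr ⟨le_antisymm (not_lt.mp c2) (not_lt.mp c1), c3⟩
               | exact Or.inl c2
               | exact Or.inr ⟨le_antisymm (not_lt.mp c2) (not_lt.mp c1),
                   lt_of_le_of_ne (not_lt.mp c3) hne⟩
               | exact Or.inr ⟨le_antisymm (not_lt.mp c1) (not_lt.mp c2),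
                   lt_of_le_of_ne (not_lt.mp c3) hne⟩
               | exact absurd rfl hne)

-- === per-column equality ===
lemma pvCol_A (col : List Char) (hne : col ≠ []) :
    pvIsMost col ((pvSortByFrequencies (PySem.List.sorted col (fun c => c))).headD ' ') ∧
    pvIsLeast col ((pvSortByFrequencies (PySem.List.sorted col (fun c => c))).getLastD ' ') := by
  cases hs : PySem.List.sorted col (fun c => c) with
  | nil => exact absurd ((PySem.List.sorted_eq_nil_iff col _ _).mp hs) hne
  | cons p rest =>
    have hperm : (p :: rest).Perm col := hs ▸ PySem.List.sorted_perm col (fun c => c) false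
    have hpair : (p :: rest).Pairwise (· ≤ ·) := by
      have h := PySem.List.sorted_pairwise col (fun c : Char => c)
      rw [hs] at h
      exact h
    obtain ⟨hsound, hcomp, hpairlt, hhead⟩ := pvRuns_spec rest p 1 (le_refl 1) hpair
    have hfull : List.replicate 1 p ++ rest = p :: rest := by simp
    rw [hfull] at hsound hcomp
    have hrepl1 : List.replicate 1 p = [p] := rfl
    rw [hrepl1] at hsound hcomp hpairlt hhead
    have hGne : pvRuns p [p] rest ≠ [] := by
      intro h
      rw [h] at hhead
      simp at hhead
    have hGpair : (pvRuns p [p] rest).Pairwise (fun a b => a.headD ' ' < b.headD ' ') :=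
      List.pairwise_map.mp hpairlt
    rw [pvSbf_eq p rest]
    constructor
    · -- most frequent: head of the stable sort = first length-minimal (-len) group
      rw [List.headD_eq_head?_getD, List.head?_map, pvHead?_sorted]
      cases hmin : PySem.List.min? (pvRuns p [p] rest) (fun k => -(k.length : Int)) with
      | none => exact absurd ((PySem.List.min?_eq_none_iff _ _).mp hmin) hGne
      | some g0 =>
        obtain ⟨hg0mem, hg0lex⟩ := pvMin?_lex _ _ _ hGpair g0 hmin
        obtain ⟨d, n, hn, hg0eq, hcnt, hdmem⟩ := hsound g0 hg0mem
        have hg0head : g0.headD ' ' = d := by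
          rw [hg0eq]
          obtain ⟨n', rfl⟩ : ∃ n', n = n' + 1 := ⟨n - 1, by omega⟩
          simp [List.replicate_succ]
        have hg0len : g0.length = (p :: rest).count d := by
          rw [hg0eq, List.length_replicate, hcnt]
        simp only [Option.map_some, Option.getD_some, hg0head]
        refine ⟨hperm.mem_iff.mp hdmem, ?_⟩
        intro y hy hyne
        have hys : y ∈ p :: rest := hperm.mem_iff.mpr hy
        have hypos : 0 < (p :: rest).count y := List.count_pos_iff.mpr hys
        have hgy := hcomp y hys
        have hgyhead : (List.replicate ((p :: rest).count y) y).headD ' ' = y := by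
          obtain ⟨n', e⟩ : ∃ n', (p :: rest).count y = n' + 1 := ⟨(p :: rest).count y - 1, by omega⟩
          rw [e]
          simp [List.replicate_succ]
        have hgyne : List.replicate ((p :: rest).count y) y ≠ g0 := by
          intro h
          apply hyne
          rw [h, hg0head] at hgyhead
          exact hgyhead.symm
        have hc1 : (p :: rest).count y = col.count y := hperm.count_eq y
        have hc2 : (p :: rest).count d = col.count d := hperm.count_eq d
        rcases hg0lex _ hgy hgyne with hlt | ⟨heq, hhd⟩
        · left
          simp only [hg0len, List.length_replicate] at hlt
          omega
        · right
          simp only [hg0len, List.length_replicate] at heq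
          rw [hg0head, hgyhead] at hhd
          exact ⟨by omega, hhd⟩
    · -- least frequent: last of the stable sort = last length-maximal (-len) group
      rw [List.getLastD_eq_getLast?, List.getLast?_map, pvGetLast?_sorted]
      cases hmax : pvLastMax? (pvRuns p [p] rest) (fun k => -(k.length : Int)) with
      | none => exact absurd (pvLastMax?_eq_none hmax) hGne
      | some g0 =>
        obtain ⟨hg0mem, hg0lex⟩ := pvLastMax?_lex _ _ _ hGpair g0 hmax
        obtain ⟨d, n, hn, hg0eq, hcnt, hdmem⟩ := hsound g0 hg0mem
        have hg0head : g0.headD ' ' = d := by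
          rw [hg0eq]
          obtain ⟨n', rfl⟩ : ∃ n', n = n' + 1 := ⟨n - 1, by omega⟩
          simp [List.replicate_succ]
        have hg0len : g0.length = (p :: rest).count d := by
          rw [hg0eq, List.length_replicate, hcnt]
        simp only [Option.map_some, Option.getD_some, hg0head]
        refine ⟨hperm.mem_iff.mp hdmem, ?_⟩
        intro y hy hyne
        have hys : y ∈ p :: rest := hperm.mem_iff.mpr hy
        have hypos : 0 < (p :: rest).count y := List.count_pos_iff.mpr hys
        have hgy := hcomp y hys
        have hgyhead : (List.replicate ((p :: rest).count y) y).headD ' ' = y := by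
          obtain ⟨n', e⟩ : ∃ n', (p :: rest).count y = n' + 1 := ⟨(p :: rest).count y - 1, by omega⟩
          rw [e]
          simp [List.replicate_succ]
        have hgyne : List.replicate ((p :: rest).count y) y ≠ g0 := by
          intro h
          apply hyne
          rw [h, hg0head] at hgyhead
          exact hgyhead.symm
        have hc1 : (p :: rest).count y = col.count y := hperm.count_eq y
        have hc2 : (p :: rest).count d = col.count d := hperm.count_eq d
        rcases hg0lex _ hgy hgyne with hlt | ⟨heq, hhd⟩
        · left
          simp only [hg0len, List.length_replicate] at hlt
          omega
        · right
          simp only [hg0len, List.length_replicate] at heq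
          rw [hg0head, hgyhead] at hhd
          exact ⟨by omega, hhd⟩

lemma pvCol_B (col : List Char) (hne : col ≠ []) :
    pvIsMost col ((PySem.List.min2? (PySem.Set.ofList col) (fun c => -(col.count c : Int)) (fun c => c)).getD ' ') ∧
    pvIsLeast col ((PySem.List.max2? (PySem.Set.ofList col) (fun c => -(col.count c : Int)) (fun c => c)).getD ' ') := by
  obtain ⟨a, t, hS⟩ : ∃ a t, PySem.Set.ofList col = a :: t := by
    cases hS : PySem.Set.ofList col with
    | nil =>
      cases col with
      | nil => exact absurd rfl hne
      | cons x xs =>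
        have hx := (PySem.Set.mem_ofList (x :: xs) x).mpr (by simp)
        rw [hS] at hx
        simp at hx
    | cons a t => exact ⟨a, t, rfl⟩
  obtain ⟨m1, hm1⟩ := pvMin2?_cons_isSome (fun c => -(col.count c : Int)) t a
  obtain ⟨m2, hm2⟩ := pvMax2?_cons_isSome (fun c => -(col.count c : Int)) t a
  rw [hS, hm1, hm2]
  simp only [Option.getD_some]
  obtain ⟨hmem1, hlex1⟩ := pvMin2?_lex (fun c => -(col.count c : Int)) (a :: t) m1 hm1
  obtain ⟨hmem2, hlex2⟩ := pvMax2?_lex (fun c => -(col.count c : Int)) (a :: t) m2 hm2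
  constructor
  · refine ⟨(PySem.Set.mem_ofList col m1).mp (by rw [hS]; exact hmem1), ?_⟩
    intro y hy hyne
    have hy' : y ∈ a :: t := by rw [← hS]; exact (PySem.Set.mem_ofList col y).mpr hy
    rcases hlex1 y hy' hyne with h | ⟨h, h'⟩
    · left; omega
    · right; exact ⟨by omega, h'⟩
  · refine ⟨(PySem.Set.mem_ofList col m2).mp (by rw [hS]; exact hmem2), ?_⟩
    intro y hy hyne
    have hy' : y ∈ a :: t := by rw [← hS]; exact (PySem.Set.mem_ofList col y).mpr hy
    rcases hlex2 y hy' hyne with h | ⟨h, h'⟩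
    · left; omega
    · right; exact ⟨by omega, h'⟩

-- === zip of the reversed rows = reversed columns ===
lemma pvMinLen_cons (a : Nat) (x : List Char) (l : List (List Char)) :
    (x :: l).foldl (fun m y => min m y.length) a = l.foldl (fun m y => min m y.length) (min a x.length) := rfl

lemma pvMinLen_le_init : ∀ (l : List (List Char)) (a : Nat), l.foldl (fun m y => min m y.length) a ≤ a := by
  intro l
  induction l with
  | nil => exact fun a => le_refl a
  | cons x t ih =>
    intro a
    rw [pvMinLen_cons]
    exact le_trans (ih _) (min_le_left _ _)

lemma pvMinLen_le_mem : ∀ (l : List (List Char)) (a : Nat) (x : List Char), x ∈ l →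
    l.foldl (fun m y => min m y.length) a ≤ x.length := by
  intro l
  induction l with
  | nil => intro a x hx; simp at hx
  | cons z t ih =>
    intro a x hx
    rw [pvMinLen_cons]
    rcases List.mem_cons.mp hx with rfl | hx
    · exact le_trans (pvMinLen_le_init _ _) (min_le_right _ _)
    · exact ih _ x hx

lemma pvMinLen_ge : ∀ (l : List (List Char)) (a c : Nat), c ≤ a → (∀ x ∈ l, c ≤ x.length) →
    c ≤ l.foldl (fun m y => min m y.length) a := by
  intro l
  induction l with
  | nil => exact fun a c h _ => h
  | cons z t ih =>
    intro a c h hall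
    rw [pvMinLen_cons]
    exact ih _ c (le_min h (hall z (by simp))) (fun x hx => hall x (List.mem_cons_of_mem _ hx))

lemma pvZipStar_reverse (rows : List (List Char)) :
    pvZipStar rows.reverse = (pvZipStar rows).map List.reverse := by
  cases hrows : rows with
  | nil => rfl
  | cons r rs =>
    cases hrev : (r :: rs).reverse with
    | nil => exact absurd hrev (by simp)
    | cons r' rs' =>
      have hr'mem : r' ∈ r :: rs := by
        rw [← List.mem_reverse, hrev]; simp
      have hrmem : r ∈ r' :: rs' := by
        rw [← hrev, List.mem_reverse]; simp
      have hn : rs'.foldl (fun m l => min m l.length) r'.length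
          = rs.foldl (fun m l => min m l.length) r.length := by
      -- both are the min length over the same rows, just traversed in reverse
        have e1 : rs'.foldl (fun m l => min m l.length) r'.length
            = (r' :: rs').foldl (fun m l => min m l.length) r'.length := by
          rw [pvMinLen_cons, min_self]
        have e2 : rs.foldl (fun m l => min m l.length) r.length
            = (r :: rs).foldl (fun m l => min m l.length) r.length := by
          rw [pvMinLen_cons, min_self]
        rw [e1, e2]
        apply le_antisymm
        · apply pvMinLen_ge
          · exact pvMinLen_le_mem _ _ _ hrmem
          · intro x hx
            have hx' : x ∈ r' :: rs' := by rw [← hrev, List.mem_reverse]; exact hx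
            exact pvMinLen_le_mem _ _ _ hx'
        · apply pvMinLen_ge
          · exact pvMinLen_le_mem _ _ _ hr'mem
          · intro x hx
            have hx' : x ∈ r :: rs := by
              rw [← hrev] at hx
              exact List.mem_reverse.mp hx
            exact pvMinLen_le_mem _ _ _ hx'
      simp only [pvZipStar]
      rw [hn, List.map_map]
      apply List.map_congr_left
      intro i _
      show (r' :: rs').map (fun row => row.getD i ' ') = List.reverse ((r :: rs).map (fun row => row.getD i ' '))
      rw [← hrev, List.map_reverse]

lemma pvZipStar_ne_nil (rows : List (List Char)) : ∀ col ∈ pvZipStar rows, col ≠ [] := by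
  intro col hcol
  cases rows with
  | nil => simp [pvZipStar] at hcol
  | cons r rs =>
    simp only [pvZipStar, List.mem_map] at hcol
    obtain ⟨i, _, rfl⟩ := hcol
    simp

lemma pvSorted_reverse (col : List Char) :
    PySem.List.sorted col.reverse (fun c => c) = PySem.List.sorted col (fun c => c) := by
  apply PySem.List.eq_of_perm_of_pairwise_le_of_injective (key := fun c : Char => c)
    (fun a b h => h)
  · exact (PySem.List.sorted_perm _ _ _).trans
      ((List.reverse_perm col).trans (PySem.List.sorted_perm col _ _).symm)
  · exact PySem.List.sorted_pairwise _ _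
  · exact PySem.List.sorted_pairwise _ _

lemma pvMapMost (cols : List (List Char)) (hcols : ∀ col ∈ cols, col ≠ []) :
    cols.map (fun col => (pvSortByFrequencies (PySem.List.sorted col.reverse (fun c => c))).headD ' ')
      = cols.map (fun col =>
        (PySem.List.min2? (PySem.Set.ofList col) (fun c => -(col.count c : Int)) (fun c => c)).getD ' ') := by
  apply List.map_congr_left
  intro col hcol
  rw [pvSorted_reverse col]
  exact pvIsMost_unique (pvCol_A col (hcols col hcol)).1 (pvCol_B col (hcols col hcol)).1

lemma pvMapLeast (cols : List (List Char)) (hcols : ∀ col ∈ cols, col ≠ []) :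
    cols.map (fun col => (pvSortByFrequencies (PySem.List.sorted col.reverse (fun c => c))).getLastD ' ')
      = cols.map (fun col =>
        (PySem.List.max2? (PySem.Set.ofList col) (fun c => -(col.count c : Int)) (fun c => c)).getD ' ') := by
  apply List.map_congr_left
  intro col hcol
  rw [pvSorted_reverse col]
  exact pvIsLeast_unique (pvCol_A col (hcols col hcol)).2 (pvCol_B col (hcols col hcol)).2

-- ===== VERDICT (by name: the statement is the Claim_ definition above) =====
theorem find_repititions_spec : Claim_equal_find_repititions := by
  intro dayinput _
  unfold Spec_find_repititions
  simp only [find_repititions, find_repititions_alt]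
  rw [pvZipStar_reverse]
  rw [PySem.List.foldl_prod_mk
    (f := fun acc line => acc ++ [(pvSortByFrequencies line).headD ' '])
    (g := fun acc line => acc ++ [(pvSortByFrequencies line).getLastD ' '])]
  rw [PySem.List.foldl_prod_mk
    (f := fun acc col => acc ++
      [(PySem.List.min2? (PySem.Set.ofList col) (fun c => -(col.count c : Int)) (fun c => c)).getD ' '])
    (g := fun acc col => acc ++
      [(PySem.List.max2? (PySem.Set.ofList col) (fun c => -(col.count c : Int)) (fun c => c)).getD ' '])]
  simp only [PySem.List.foldl_append_singleton_eq_map, List.nil_append, List.map_map]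
  rw [show (fun x => (pvSortByFrequencies x).headD ' ') ∘ (fun x => PySem.List.sorted x fun c => c) ∘ List.reverse
      = fun col => (pvSortByFrequencies (PySem.List.sorted col.reverse (fun c => c))).headD ' ' from rfl]
  rw [show (fun x => (pvSortByFrequencies x).getLastD ' ') ∘ (fun x => PySem.List.sorted x fun c => c) ∘ List.reverse
      = fun col => (pvSortByFrequencies (PySem.List.sorted col.reverse (fun c => c))).getLastD ' ' from rfl]
  rw [pvMapMost _ (pvZipStar_ne_nil _), pvMapLeast _ (pvZipStar_ne_nil _)]
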